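-- pv_equiv track=rewrite | github.com/sujungeee/python-programmers | 1회차/13.py | stackList
-- ===== SOURCE A (Python) =====
-- def stackList(board): # Board 배열을 스택으로 구성하기
--     N = len(board[0])
--     stackList = [[0 for _ in range(N)] for _ in range(N)]
--     for i in range(N):
--         for j in range(N):
--             if board[i][j] != 0:
--                 stackList[j][N - 1 - i] = board[i][j]
--             else:
--                 stackList[j].pop(N - 1 - i)
--     return stackList
-- ===== SOURCE B (Python) =====
-- def stackList(board):
--     N = len(board[0])
--     cols = [[] for _ in range(N)]
--     for i in range(N):
--         row = board[i]
--         for j in range(N):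
--             v = row[j]
--             if v != 0:
--                 cols[j].append(v)
--     return [c[::-1] for c in cols]
-- ===== Notes on version B (the rewrite author's own statement) =====
-- stated objective: simpler
-- what changed: B replaces A's in-place mutation of a preallocated NxN zero matrix (assigning at index N-1-i or popping it) by directly appending each nonzero board[i][j] to a per-column list and reversing each column at the end.
import Mathlib
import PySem

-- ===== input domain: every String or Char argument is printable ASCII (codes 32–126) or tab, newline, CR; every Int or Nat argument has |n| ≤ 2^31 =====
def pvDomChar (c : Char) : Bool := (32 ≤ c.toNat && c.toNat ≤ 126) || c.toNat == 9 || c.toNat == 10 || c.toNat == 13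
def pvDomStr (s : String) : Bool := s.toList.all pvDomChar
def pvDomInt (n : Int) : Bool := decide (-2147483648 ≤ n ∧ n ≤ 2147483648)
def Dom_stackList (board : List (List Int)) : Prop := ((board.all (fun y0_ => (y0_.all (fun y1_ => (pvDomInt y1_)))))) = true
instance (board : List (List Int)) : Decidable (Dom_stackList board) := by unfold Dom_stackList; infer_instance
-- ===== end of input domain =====

-- B replaces A's pop-based in-place mutation of a preallocated N×N zero matrix by directly
-- collecting each column's nonzero entries and reversing them (objective: simpler).

-- ===== PORT A =====
-- literal port of A: N×N zero matrix, then per cell either assign at N-1-i or pop index N-1-i.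
-- board[i][j] is ported as getD with default 0: Pre_stackList excludes out-of-range access
-- (where Python raises IndexError), so the default is never observed on admitted inputs.
def stackList (board : List (List Int)) : List (List Int) :=
  let N := (board.headD []).length
  (List.range N).foldl (fun st i =>
    (List.range N).foldl (fun st j =>
      let v := (board.getD i []).getD j 0
      if v ≠ 0 then st.modify j (fun row => row.set (N - 1 - i) v)
      else st.modify j (fun row => row.eraseIdx (N - 1 - i))) st)
    (List.replicate N (List.replicate N (0 : Int)))

-- ===== PORT B =====
def stackList_alt (board : List (List Int)) : List (List Int) :=
  let N := (board.headD []).length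
  let cols := (List.range N).foldl (fun cols i =>
    let row := board.getD i []
    (List.range N).foldl (fun cols j =>
      let v := row.getD j 0
      if v ≠ 0 then cols.modify j (fun c => c ++ [v]) else cols) cols)
    (List.replicate N ([] : List Int))
  cols.map (fun c => c.reverse)

-- ===== PRECONDITION & SPEC =====
-- Pre_ excludes exactly the inputs where Python A raises: empty board (board[0] → IndexError)
-- and boards whose first N rows are missing, or shorter than N = len(board[0]) (board[i][j] → IndexError).
def Pre_stackList (board : List (List Int)) : Prop :=
  board ≠ [] ∧ (board.headD []).length ≤ board.length ∧
    ∀ row ∈ board.take (board.headD []).length, (board.headD []).length ≤ row.length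

instance (board : List (List Int)) : Decidable (Pre_stackList board) := by
  unfold Pre_stackList; infer_instance

def pvWitness_stackList : List (List Int) := [[1, 0], [0, 2]]

def Spec_stackList (board : List (List Int)) (out : List (List Int)) : Prop := out = stackList_alt board
instance (board : List (List Int)) (out : List (List Int)) : Decidable (Spec_stackList board out) := by unfold Spec_stackList; infer_instance

-- ===== CLAIM (what is proved, stated in full; the proofs are below) =====
def Claim_equal_stackList : Prop := ∀ (board : List (List Int)), Dom_stackList board → Pre_stackList board → Spec_stackList board (stackList board)

-- ===== LEMMAS AND PROOFS =====

-- the value Python reads at board[i][j] (defaulted; in range under Pre_)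
def pvG (board : List (List Int)) (i j : Nat) : Int := (board.getD i []).getD j 0

-- the nonzero entries of column j among the first m rows, in increasing row order
def pvCol (board : List (List Int)) (m j : Nat) : List Int :=
  ((List.range m).map (fun i => pvG board i j)).filter (fun v => v ≠ 0)

theorem pv_modify_append_left {α : Type} (f : α → α) (j : Nat) (a b : List α)
    (h : j < a.length) : (a ++ b).modify j f = a.modify j f ++ b := by
  apply List.ext_getElem?
  intro k
  simp only [List.getElem?_modify, List.getElem?_append]
  split_ifs with h1 h2 h2 <;> simp_all
  · omega

theorem pv_modify_at_length {α : Type} (f : α → α) (a : List α) (x : α) (b : List α)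
    (k : Nat) (h : k = a.length) : (a ++ x :: b).modify k f = a ++ f x :: b := by
  subst h
  induction a with
  | nil => simp [List.modify_cons]
  | cons y a ih => simp [ih]

theorem pv_modify_id {α : Type} (l : List α) (j : Nat) : l.modify j (fun x => x) = l := by
  apply List.ext_getElem?
  intro k
  simp [List.getElem?_modify]

theorem pv_fold_mod_extend {α : Type} (F : Nat → α → α) (js : List Nat) :
    ∀ (a b : List α), (∀ j ∈ js, j < a.length) →
    js.foldl (fun st j => st.modify j (F j)) (a ++ b)
      = js.foldl (fun st j => st.modify j (F j)) a ++ b := by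
  induction js with
  | nil => intro a b _; rfl
  | cons j js ih =>
    intro a b h
    simp only [List.foldl_cons]
    rw [pv_modify_append_left _ _ _ _ (h j (by simp))]
    exact ih _ b (fun j' hj' => by rw [List.length_modify]; exact h j' (by simp [hj']))

theorem pv_fold_mod {α : Type} (F : Nat → α → α) :
    ∀ (n : Nat) (f : Nat → α),
    (List.range n).foldl (fun st j => st.modify j (F j)) ((List.range n).map f)
      = (List.range n).map (fun j => F j (f j)) := by
  intro n
  induction n with
  | zero => intro f; rfl
  | succ n ih =>
    intro f
    rw [List.range_succ, List.map_append, List.map_append, List.foldl_append]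
    rw [pv_fold_mod_extend F _ _ _ (by intro j hj; simp at hj ⊢; omega)]
    rw [ih f]
    simp only [List.map_cons, List.map_nil, List.foldl_cons, List.foldl_nil]
    exact pv_modify_at_length _ _ _ _ _ (by simp)

theorem pv_set_repl (n : Nat) (hn : 0 < n) (t : List Int) (v : Int) :
    (List.replicate n (0 : Int) ++ t).set (n - 1) v = List.replicate (n - 1) 0 ++ (v :: t) := by
  obtain ⟨m, rfl⟩ : ∃ m, n = m + 1 := ⟨n - 1, by omega⟩
  rw [List.replicate_succ' , List.append_assoc]
  rw [List.set_append_right _ _ (by simp)]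
  simp

theorem pv_erase_repl (n : Nat) (hn : 0 < n) (t : List Int) :
    (List.replicate n (0 : Int) ++ t).eraseIdx (n - 1) = List.replicate (n - 1) 0 ++ t := by
  obtain ⟨m, rfl⟩ : ∃ m, n = m + 1 := ⟨n - 1, by omega⟩
  rw [List.replicate_succ', List.append_assoc, List.eraseIdx_append]
  simp

theorem pv_col_succ (board : List (List Int)) (m j : Nat) :
    pvCol board (m + 1) j
      = pvCol board m j ++ (if pvG board m j ≠ 0 then [pvG board m j] else []) := by
  unfold pvCol
  rw [List.range_succ, List.map_append, List.filter_append]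
  simp only [List.map_cons, List.map_nil, List.filter_cons, List.filter_nil]
  split_ifs with h <;> simp_all

-- invariant for A's outer loop: after m rows, column j of the state is
-- N-m untouched zeros followed by the processed suffix (reversed nonzero column prefix)
theorem pv_A_state (board : List (List Int)) (N : Nat) :
    ∀ m, m ≤ N →
    (List.range m).foldl (fun st i =>
      (List.range N).foldl (fun st j =>
        let v := (board.getD i []).getD j 0
        if v ≠ 0 then st.modify j (fun row => row.set (N - 1 - i) v)
        else st.modify j (fun row => row.eraseIdx (N - 1 - i))) st)
      (List.replicate N (List.replicate N (0 : Int)))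
      = (List.range N).map (fun j => List.replicate (N - m) (0 : Int) ++ (pvCol board m j).reverse) := by
  intro m
  induction m with
  | zero =>
    intro _
    simp [pvCol, List.map_const']
  | succ m ih =>
    intro hm
    rw [List.range_succ, List.foldl_append, ih (by omega)]
    simp only [List.foldl_cons, List.foldl_nil]
    have hbr : ∀ (st : List (List Int)) (j : Nat),
        (let v := (board.getD m []).getD j 0
         if v ≠ 0 then st.modify j (fun row => row.set (N - 1 - m) v)
         else st.modify j (fun row => row.eraseIdx (N - 1 - m)))
        = st.modify j (fun row =>
            if pvG board m j ≠ 0 then row.set (N - 1 - m) (pvG board m j)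
            else row.eraseIdx (N - 1 - m)) := by
      intro st j
      simp only [pvG]
      split_ifs <;> rfl
    rw [funext fun st => funext fun j => hbr st j]
    rw [pv_fold_mod]
    apply List.map_congr_left
    intro j _
    have h1 : N - 1 - m = (N - m) - 1 := by omega
    have h2 : 0 < N - m := by omega
    have h3 : N - (m + 1) = (N - m) - 1 := by omega
    rw [pv_col_succ, List.reverse_append]
    split_ifs with h
    · rw [h1, pv_set_repl _ h2, h3]; simp
    · rw [h1, pv_erase_repl _ h2, h3]; simp

-- invariant for B's outer loop: after m rows, cols j holds the nonzero column prefix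
theorem pv_B_state (board : List (List Int)) (N : Nat) :
    ∀ m, m ≤ N →
    (List.range m).foldl (fun cols i =>
      let row := board.getD i []
      (List.range N).foldl (fun cols j =>
        let v := row.getD j 0
        if v ≠ 0 then cols.modify j (fun c => c ++ [v]) else cols) cols)
      (List.replicate N ([] : List Int))
      = (List.range N).map (fun j => pvCol board m j) := by
  intro m
  induction m with
  | zero =>
    intro _
    simp [pvCol, List.map_const']
  | succ m ih =>
    intro hm
    rw [List.range_succ, List.foldl_append, ih (by omega)]
    simp only [List.foldl_cons, List.foldl_nil]
    have hbr : ∀ (cols : List (List Int)) (j : Nat),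
        (let v := (board.getD m []).getD j 0
         if v ≠ 0 then cols.modify j (fun c => c ++ [v]) else cols)
        = cols.modify j (fun c => if pvG board m j ≠ 0 then c ++ [pvG board m j] else c) := by
      intro cols j
      simp only [pvG]
      split_ifs with h
      · rfl
      · exact (pv_modify_id cols j).symm
    rw [funext fun st => funext fun j => hbr st j]
    rw [pv_fold_mod]
    apply List.map_congr_left
    intro j _
    rw [pv_col_succ]
    split_ifs <;> simp

-- ===== VERDICT (by name: the statement is the Claim_ definition above) =====
theorem stackList_spec : Claim_equal_stackList := by
  intro board _ _
  unfold Spec_stackList stackList stackList_alt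
  simp only []
  rw [pv_A_state board _ _ (le_refl _), pv_B_state board _ _ (le_refl _)]
  simp [List.map_map, Function.comp]
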